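-- pv_equiv track=rewrite | github.com/kh030728/SW-expert-academy-study-storage | HAONBU/4047/4047.py | verify_king
-- ===== SOURCE A (Python) =====
-- def verify_king(sliced_a):
--     error_vdeck = set(sliced_a)
--     if len(sliced_a) != len(error_vdeck):  # 중복되는 데이터가 있는지 확인
--         return "ERROR"
--     else:
--         a_s, a_d, a_h, a_c = 13, 13, 13, 13
--         for card in sliced_a:  # 데이터의 첫 글자로 카드의 문양을 판단함
--             if card[0] == 'S':
--                 a_s -= 1
--             elif card[0] == 'D':
--                 a_d -= 1
--             elif card[0] == 'H':
--                 a_h -= 1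
--             elif card[0] == 'C':
--                 a_c -= 1
--         return "%d %d %d %d" % (a_s, a_d, a_h, a_c)
-- ===== SOURCE B (Python) =====
-- def verify_king(sliced_a):
--     if len(set(sliced_a)) != len(sliced_a):
--         return "ERROR"
--     return "%d %d %d %d" % tuple(
--         13 - sum(1 for c in sliced_a if c.startswith(s)) for s in "SDHC")
-- ===== Notes on version B (the rewrite author's own statement) =====
-- stated objective: simpler
-- what changed: Replaces the single four-counter decrement loop by four independent startswith-count scans folded into the format string, and uses startswith instead of indexing card[0].
import Mathlib
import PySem

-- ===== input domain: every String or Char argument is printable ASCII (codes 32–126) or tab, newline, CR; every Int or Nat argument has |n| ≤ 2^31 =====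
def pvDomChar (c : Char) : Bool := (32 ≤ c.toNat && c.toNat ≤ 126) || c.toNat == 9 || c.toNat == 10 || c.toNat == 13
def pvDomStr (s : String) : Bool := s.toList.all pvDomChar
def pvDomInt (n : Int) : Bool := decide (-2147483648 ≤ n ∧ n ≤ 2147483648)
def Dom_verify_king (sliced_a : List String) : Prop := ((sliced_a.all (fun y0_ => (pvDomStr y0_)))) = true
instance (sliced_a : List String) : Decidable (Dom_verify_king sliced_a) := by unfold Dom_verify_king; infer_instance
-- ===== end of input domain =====

-- B replaces A's single four-counter decrement loop by four independent startswith-count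
-- scans (simpler decomposition); equivalence is proved on decks where A does not raise.


-- ===== PORT A =====
-- one step of A's loop: decrement the counter named by card[0] ('S','D','H','C');
-- pyGet? card 0 = none is exactly Python's IndexError on card[0] (excluded by Pre_)
def verifyKingStepA (st : Int × Int × Int × Int) (card : String) : Int × Int × Int × Int :=
  match PySem.Str.pyGet? card 0 with
  | none => st          -- unreachable inside Pre_ (Python raises IndexError here)
  | some ch =>
    if ch == 'S' then (st.1 - 1, st.2.1, st.2.2.1, st.2.2.2)
    else if ch == 'D' then (st.1, st.2.1 - 1, st.2.2.1, st.2.2.2)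
    else if ch == 'H' then (st.1, st.2.1, st.2.2.1 - 1, st.2.2.2)
    else if ch == 'C' then (st.1, st.2.1, st.2.2.1, st.2.2.2 - 1)
    else st

def verify_king (sliced_a : List String) : String :=
  let error_vdeck : PySem.Set String := PySem.Set.ofList sliced_a
  if sliced_a.length ≠ error_vdeck.length then "ERROR"
  else
    let st := sliced_a.foldl verifyKingStepA (13, 13, 13, 13)
    PySem.Int.toStr st.1 ++ " " ++ PySem.Int.toStr st.2.1 ++ " " ++
      PySem.Int.toStr st.2.2.1 ++ " " ++ PySem.Int.toStr st.2.2.2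

-- ===== PORT B =====
-- sum(1 for c in sliced_a if c.startswith(p))
def cntStart (sliced_a : List String) (p : String) : Int :=
  sliced_a.foldl (fun acc c => if PySem.Str.startswith c p then acc + 1 else acc) 0

def verify_king_alt (sliced_a : List String) : String :=
  if (PySem.Set.ofList sliced_a).length ≠ sliced_a.length then "ERROR"
  else
    PySem.Int.toStr (13 - cntStart sliced_a "S") ++ " " ++
    PySem.Int.toStr (13 - cntStart sliced_a "D") ++ " " ++
    PySem.Int.toStr (13 - cntStart sliced_a "H") ++ " " ++
    PySem.Int.toStr (13 - cntStart sliced_a "C")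

-- ===== PRECONDITION & SPEC =====
-- Pre_ excludes exactly the decks where A raises IndexError: a duplicate-free deck
-- containing the empty string (card[0] on ""). On decks with duplicates A returns
-- "ERROR" before indexing, so those stay inside.
def Pre_verify_king (sliced_a : List String) : Prop := "" ∈ sliced_a → ¬ sliced_a.Nodup
instance (sliced_a : List String) : Decidable (Pre_verify_king sliced_a) := by unfold Pre_verify_king; infer_instance

def pvWitness_verify_king : List String := ["S1", "D2", "XQ"]

def Spec_verify_king (sliced_a : List String) (out : String) : Prop := out = verify_king_alt sliced_a
instance (sliced_a : List String) (out : String) : Decidable (Spec_verify_king sliced_a out) := by unfold Spec_verify_king; infer_instance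

-- ===== CLAIM (what is proved, stated in full; the proofs are below) =====
def Claim_equal_verify_king : Prop := ∀ (sliced_a : List String), Dom_verify_king sliced_a → Pre_verify_king sliced_a → Spec_verify_king sliced_a (verify_king sliced_a)

-- ===== LEMMAS AND PROOFS =====

-- count of cards whose first character is ch (counting via card[0], skipping nothing on "")
def cntHd (xs : List String) (ch : Char) : Int :=
  (xs.countP (fun x => PySem.Str.pyGet? x 0 == some ch) : Int)

-- set(xs) has as many elements as xs iff xs has no duplicates
theorem ofList_length_eq_iff (xs : List String) :
    (PySem.Set.ofList xs).length = xs.length ↔ xs.Nodup := by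
  constructor
  · intro h
    have hcard : (PySem.Set.ofList xs).length = xs.toFinset.card := by
      rw [← List.toFinset_card_of_nodup (PySem.Set.nodup_ofList xs)]
      congr 1
      ext a
      simp [PySem.Set.mem_ofList]
    rw [hcard, List.card_toFinset] at h
    have := List.Sublist.eq_of_length (List.dedup_sublist xs) h
    rw [← this]
    exact List.nodup_dedup xs
  · intro h
    rw [PySem.Set.ofList_eq_self_of_nodup xs h]

-- A's fold computes the initial counters minus the count of each first character
theorem foldA_counts (xs : List String) :
    ∀ s d h c : Int,
      xs.foldl verifyKingStepA (s, d, h, c) =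
        (s - cntHd xs 'S', d - cntHd xs 'D', h - cntHd xs 'H', c - cntHd xs 'C') := by
  induction xs with
  | nil => intro s d h c; simp [cntHd]
  | cons x xs ih =>
    intro s d h c
    rw [List.foldl_cons]
    cases hget : PySem.Str.pyGet? x 0 with
    | none =>
      have hstep : verifyKingStepA (s, d, h, c) x = (s, d, h, c) := by
        simp only [verifyKingStepA, hget]
      have hget' : PySem.List.pyGet? x.toList 0 = none := by simpa using hget
      rw [hstep, ih]
      simp [cntHd, hget']
    | some hd =>
      have hcnt : ∀ ch : Char,
          cntHd (x :: xs) ch = cntHd xs ch + (if hd = ch then 1 else 0) := by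
        intro ch
        simp only [cntHd, List.countP_cons, hget, beq_iff_eq, Option.some.injEq]
        split_ifs <;> push_cast <;> ring_nf
      have hstep : verifyKingStepA (s, d, h, c) x =
          (if hd = 'S' then (s - 1, d, h, c)
           else if hd = 'D' then (s, d - 1, h, c)
           else if hd = 'H' then (s, d, h - 1, c)
           else if hd = 'C' then (s, d, h, c - 1)
           else (s, d, h, c)) := by
        simp only [verifyKingStepA, hget, beq_iff_eq]
      rw [hstep, hcnt 'S', hcnt 'D', hcnt 'H', hcnt 'C']
      split_ifs with h1 h2 h3 h4 <;>
        rw [ih] <;>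
        simp only [Prod.mk.injEq] <;>
        refine ⟨by first | omega | simp_all,
                by first | omega | simp_all,
                by first | omega | simp_all,
                by first | omega | simp_all⟩

-- on nonempty cards, startswith(single char) and first-character equality coincide
theorem cntStart_eq_cntHd (xs : List String) (hx : ∀ x ∈ xs, x ≠ "") (ch : Char)
    (p : String) (hp : p.toList = [ch]) :
    cntStart xs p = cntHd xs ch := by
  unfold cntStart cntHd
  rw [PySem.List.foldl_count_if]
  simp only [zero_add]
  congr 1
  apply List.countP_congr
  intro x hxmem
  have hlist : x.toList ≠ [] := by
    intro h'
    exact hx x hxmem (String.toList_eq_nil_iff.mp h')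
  obtain ⟨hd, t, hxeq⟩ := List.exists_cons_of_ne_nil hlist
  have hget : PySem.Str.pyGet? x 0 = some hd := by
    simp [PySem.Str.pyGet?_eq, hxeq]
  have hsw : PySem.Str.startswith x p = (hd == ch) := by
    simp only [PySem.Str.startswith_eq, hxeq, hp]
    by_cases h : hd = ch
    · subst h
      have : [hd] <+: hd :: t := ⟨t, rfl⟩
      simp [PySem.Chars.startswith_iff, this]
    · have : ¬ ([ch] <+: hd :: t) := by
        rw [List.cons_prefix_cons]
        intro hc
        exact h hc.1.symm
      have hne : (hd == ch) = false := by simp [h]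
      rw [hne]
      rw [← Bool.not_eq_true]
      rw [PySem.Chars.startswith_iff]
      exact this
  rw [hsw, hget]
  cases hb : (hd == ch) <;> simp_all

-- ===== VERDICT (by name: the statement is the Claim_ definition above) =====
theorem verify_king_spec : Claim_equal_verify_king := by
  intro xs _ hpre
  unfold Spec_verify_king verify_king verify_king_alt
  by_cases hlen : xs.length = (PySem.Set.ofList xs).length
  · have hnodup : xs.Nodup := (ofList_length_eq_iff xs).mp hlen.symm
    have hx : ∀ x ∈ xs, x ≠ "" := by
      intro x hxmem hxe
      exact (hpre (hxe ▸ hxmem)) hnodup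
    simp only [hlen.symm, ne_eq, not_true_eq_false, if_false]
    rw [foldA_counts xs 13 13 13 13,
      cntStart_eq_cntHd xs hx 'S' "S" rfl, cntStart_eq_cntHd xs hx 'D' "D" rfl,
      cntStart_eq_cntHd xs hx 'H' "H" rfl, cntStart_eq_cntHd xs hx 'C' "C" rfl]
  · simp [hlen, Ne.symm hlen]
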